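-- pv_equiv track=rewrite | github.com/DivineJK/MyPythonLibrary | Others/ARC047C.py | ARC047C
-- ===== SOURCE A (Python) =====
-- def ARC047C(n, k):
--     x = [0]*n
--     t = n
--     for i in range(n-k+1):
--         x[i] = t // k
--         t = (t % k) * (n - i - 1)
--     p = n - k
--     while x[p] == 0:
--         x[p] = n - p - 1
--         p -= 1
--     x[p] -= 1
--     for i in range(k-1):
--         x[n-i-1] = i
--     tree = [0]*(n+1)
--     for i in range(n):
--         p = i + 1
--         while p <= n:
--             tree[p] += 1
--             p += p - (p & (p - 1))
--     res = [0]*n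
--     for i in range(n):
--         t = x[i]
--         l, r = 0, n
--         d = r // 2
--         while r - l > 1:
--             p = d
--             s = 0
--             while p:
--                 s += tree[p]
--                 p &= p - 1
--             if s <= t:
--                 l = d
--             else:
--                 r = d
--             d = (l + r) // 2
--         res[i] = d
--         p = d + 1
--         while p <= n:
--             tree[p] -= 1
--             p += p - (p & (p - 1))
--     return res
-- ===== SOURCE B (Python) =====
-- def ARC047C(n, k):
--     # decode: factorial-style code computed greedily, then each code picks the
--     # t-th remaining element of [0, n) by popping from a plain list
--     t = n
--     x = []
--     for i in range(n - k + 1):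
--         x.append(t // k)
--         t = t % k * (n - i - 1)
--     p = n - k
--     while x[p] == 0:
--         p -= 1
--     x[p] -= 1
--     x[p + 1:] = [n - j - 1 for j in range(p + 1, n - k + 1)]
--     x.extend(range(k - 2, -1, -1))
--     avail = list(range(n))
--     return [avail.pop(t) for t in x]
-- ===== Notes on version B (the rewrite author's own statement) =====
-- stated objective: simpler
-- what changed: The Fenwick tree with its O(log^2 n) binary-searched prefix-sum selection and update chains is replaced by a plain list of the remaining elements from which each code pops its t-th entry, and the in-place borrow/fill index surgery on a preallocated array is replaced by building the code list with append, a slice assignment and an extend.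
import Mathlib
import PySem

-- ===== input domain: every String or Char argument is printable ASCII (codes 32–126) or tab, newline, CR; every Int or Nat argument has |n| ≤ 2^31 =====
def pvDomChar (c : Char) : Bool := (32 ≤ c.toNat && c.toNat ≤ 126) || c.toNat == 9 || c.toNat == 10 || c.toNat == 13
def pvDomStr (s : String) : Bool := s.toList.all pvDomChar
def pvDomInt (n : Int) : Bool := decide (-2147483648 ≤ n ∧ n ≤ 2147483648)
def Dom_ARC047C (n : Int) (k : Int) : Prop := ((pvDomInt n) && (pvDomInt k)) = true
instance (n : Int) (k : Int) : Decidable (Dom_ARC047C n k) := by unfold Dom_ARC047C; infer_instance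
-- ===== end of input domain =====

-- B replaces A's Fenwick tree (binary-searched prefix-sum selection, update chains) by a plain
-- list of the remaining elements from which each code pops its t-th entry: simpler, not faster.
-- ===== PORT A =====
def pvA_loop1 (N K : Nat) : List Nat × Nat :=
  (List.range (N - K + 1)).foldl
    (fun st i => (st.1.set i (st.2 / K), st.2 % K * (N - i - 1))) (List.replicate N 0, N)

def pvA_borrow (N : Nat) (x : List Nat) (p : Nat) : List Nat :=
  if x.getD p 0 ≠ 0 then x.set p (x.getD p 0 - 1)
  else match p with
    | 0 => x.set 0 (N - 1)      -- Python would continue at index -1; unreachable under Pre_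
    | q + 1 => pvA_borrow N (x.set (q + 1) (N - (q + 1) - 1)) q

def pvA_fill (N K : Nat) (x : List Nat) : List Nat :=
  (List.range (K - 1)).foldl (fun y i => y.set (N - i - 1) i) x

def pvA_codes (N K : Nat) : List Nat :=
  pvA_fill N K (pvA_borrow N (pvA_loop1 N K).1 (N - K))

def pvA_chainAdj (g : Nat → Nat) (N : Nat) (tree : List Nat) (p fuel : Nat) : List Nat :=
  match fuel with
  | 0 => tree
  | fuel + 1 =>
    if p ≤ N then
      pvA_chainAdj g N (tree.set p (g (tree.getD p 0))) (p + (p - (p &&& (p - 1)))) fuel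
    else tree

def pvA_build (N : Nat) : List Nat :=
  (List.range N).foldl (fun tree i => pvA_chainAdj (· + 1) N tree (i + 1) (N + 1))
    (List.replicate (N + 1) 0)

def pvA_qsum (tree : List Nat) (p : Nat) : Nat :=
  if p = 0 then 0
  else tree.getD p 0 + pvA_qsum tree (p &&& (p - 1))
  decreasing_by
    have h1 : p &&& (p - 1) ≤ p - 1 := Nat.and_le_right
    omega

def pvA_bsearch (tree : List Nat) (t l r d fuel : Nat) : Nat :=
  match fuel with
  | 0 => d
  | fuel + 1 =>
    if 1 < r - l then
      if pvA_qsum tree d ≤ t then pvA_bsearch tree t d r ((d + r) / 2) fuel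
      else pvA_bsearch tree t l d ((l + d) / 2) fuel
    else d

def pvA_main (N : Nat) (x : List Nat) : List Nat :=
  ((List.range N).foldl
    (fun (st : List Nat × List Nat) i =>
      let t := x.getD i 0
      let d := pvA_bsearch st.1 t 0 N (N / 2) N
      (pvA_chainAdj (· - 1) N st.1 (d + 1) (N + 1), st.2.set i d))
    (pvA_build N, List.replicate N 0)).2

def ARC047C (n : Int) (k : Int) : List Int :=
  (pvA_main n.toNat (pvA_codes n.toNat k.toNat)).map (fun v => (v : Int))

-- ===== PORT B =====
def pvB_loop1 (N K : Nat) : List Nat × Nat :=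
  (List.range (N - K + 1)).foldl
    (fun st i => (st.1 ++ [st.2 / K], st.2 % K * (N - i - 1))) ([], N)

def pvB_findNZ (x : List Nat) : Nat → Nat
  | 0 => 0      -- at p = 0 the loop stops under Pre_ (x[0] = n//k ≥ 1); Python would continue at -1 otherwise
  | p + 1 => if x.getD (p + 1) 0 = 0 then pvB_findNZ x p else p + 1

def pvB_codes (N K : Nat) : List Nat :=
  let x := (pvB_loop1 N K).1
  let p := pvB_findNZ x (N - K)
  (x.set p (x.getD p 0 - 1)).take (p + 1)
    ++ (List.range' (p + 1) (N - K - p)).map (fun j => N - j - 1)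
    ++ (List.range (K - 1)).reverse

def pvB_pop (codes : List Nat) (avail : List Nat) : List Nat :=
  match codes with
  | [] => []
  | t :: cs => avail.getD t 0 :: pvB_pop cs (avail.eraseIdx t)

def ARC047C_alt (n : Int) (k : Int) : List Int :=
  (pvB_pop (pvB_codes n.toNat k.toNat) (List.range n.toNat)).map (fun v => (v : Int))

-- ===== PRECONDITION & SPEC =====
-- Pre_: exactly the inputs on which the Python A returns normally: 1 ≤ k ≤ n
-- (k < 1 or k > n makes A raise ZeroDivisionError / IndexError).
def Pre_ARC047C (n : Int) (k : Int) : Prop := 1 ≤ k ∧ k ≤ n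
instance (n : Int) (k : Int) : Decidable (Pre_ARC047C n k) := by unfold Pre_ARC047C; infer_instance
def pvWitness_ARC047C : Int × Int := (3, 2)

def Spec_ARC047C (n : Int) (k : Int) (out : List Int) : Prop := out = ARC047C_alt n k
instance (n : Int) (k : Int) (out : List Int) : Decidable (Spec_ARC047C n k out) := by unfold Spec_ARC047C; infer_instance

-- ===== CLAIM (what is proved, stated in full; the proofs are below) =====
def Claim_equal_ARC047C : Prop := ∀ (n : Int) (k : Int), Dom_ARC047C n k → Pre_ARC047C n k → Spec_ARC047C n k (ARC047C n k)

-- ===== LEMMAS AND PROOFS =====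
theorem pv_and_even_odd (a b : Nat) : (2*a) &&& (2*b+1) = 2*(a &&& b) := by
  have := Nat.bitwise_bit (f := and) (a := false) (m := a) (b := true) (n := b) (by simp)
  simpa [Nat.bit, HAnd.hAnd, AndOp.and, Nat.two_mul] using this

theorem pv_and_odd_even (a b : Nat) : (2*a+1) &&& (2*b) = 2*(a &&& b) := by
  have := Nat.bitwise_bit (f := and) (a := true) (m := a) (b := false) (n := b) (by simp)
  simpa [Nat.bit, HAnd.hAnd, AndOp.and, Nat.two_mul] using this

theorem pv_land_pred (r m : Nat) : (2^r*(2*m+1)) &&& (2^r*(2*m+1) - 1) = 2^r*(2*m) := by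
  induction r with
  | zero => simpa using pv_and_odd_even m m
  | succ r ih =>
    have h1 : 2^(r+1)*(2*m+1) = 2*(2^r*(2*m+1)) := by ring
    have hq : 1 ≤ 2^r*(2*m+1) := Nat.one_le_iff_ne_zero.mpr (by positivity)
    have h2 : 2^(r+1)*(2*m+1) - 1 = 2*(2^r*(2*m+1) - 1) + 1 := by omega
    rw [h2, h1, pv_and_even_odd, ih]; ring

theorem pv_decomp (p : Nat) (hp : 1 ≤ p) :
    ∃ r m, p = 2^r*(2*m+1) ∧ p &&& (p-1) = 2^r*(2*m) := by
  obtain ⟨r, m, hm, hpm⟩ := Nat.exists_eq_two_pow_mul_odd (n := p) (by omega)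
  obtain ⟨j, hj⟩ := hm
  subst hj; subst hpm
  exact ⟨r, j, rfl, pv_land_pred r j⟩

theorem pv_next_eq (r m : Nat) :
    2^r*(2*m+1) + (2^r*(2*m+1) - 2^r*(2*m)) = 2^r*(2*m+2) := by
  have h : 2^r*(2*m+1) - 2^r*(2*m) = 2^r := by
    rw [show 2^r*(2*m+1) = 2^r*(2*m) + 2^r from by ring, Nat.add_sub_cancel_left]
  rw [h]; ring

theorem pv_B1 {p q : Nat} (hp : 1 ≤ p) (hq : 1 ≤ q) (hlt : p < q)
    (hd : q &&& (q-1) < p) : p + (p - (p &&& (p-1))) ≤ q := by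
  obtain ⟨r, m, hp1, hp2⟩ := pv_decomp p hp
  obtain ⟨s, u, hq1, hq2⟩ := pv_decomp q hq
  have hr0 : 0 < (2:Nat)^r := Nat.two_pow_pos r
  have hs0 : 0 < (2:Nat)^s := Nat.two_pow_pos s
  rw [hp2, hp1, pv_next_eq]
  rw [hq2] at hd; rw [hp1] at hlt hd; rw [hq1] at hlt ⊢
  have hrs : r < s := by
    by_contra h
    push_neg at h
    obtain ⟨e, he⟩ := Nat.exists_eq_add_of_le h
    have h2 : 2^r = 2^s * 2^e := by rw [he, pow_add]
    rw [h2] at hlt hd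
    have c1 : 2*u < 2^e*(2*m+1) := by nlinarith
    have c2 : 2^e*(2*m+1) < 2*u+1 := by nlinarith
    omega
  obtain ⟨e, he⟩ := Nat.exists_eq_add_of_lt hrs
  have h2 : 2^s = 2^r * 2 * 2^e := by rw [he]; ring
  rw [h2] at hlt ⊢
  have key : 2*m+1 < 2*(2^e*(2*u+1)) := by nlinarith
  have key2 : m + 1 ≤ 2^e*(2*u+1) := by omega
  nlinarith

theorem pv_B2 {p q : Nat} (hp : 1 ≤ p) (hq : 1 ≤ q)
    (hge : p + (p - (p &&& (p-1))) ≤ q) (hd : q &&& (q-1) < p + (p - (p &&& (p-1)))) :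
    q &&& (q-1) < p := by
  obtain ⟨r, m, hp1, hp2⟩ := pv_decomp p hp
  obtain ⟨s, u, hq1, hq2⟩ := pv_decomp q hq
  have hr0 : 0 < (2:Nat)^r := Nat.two_pow_pos r
  have hs0 : 0 < (2:Nat)^s := Nat.two_pow_pos s
  rw [hp2, hp1, pv_next_eq] at hge hd
  rw [hq1] at hge; rw [hq2] at hd ⊢; rw [hp1]
  have hrs : r < s := by
    by_contra h
    push_neg at h
    obtain ⟨e, he⟩ := Nat.exists_eq_add_of_le h
    have h2 : 2^r = 2^s * 2^e := by rw [he, pow_add]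
    rw [h2] at hge hd
    have c1 : 2*u < 2^e*(2*m+2) := by nlinarith
    have c2 : 2^e*(2*m+2) ≤ 2*u+1 := by nlinarith
    have c3 : 2^e*(2*m+2) = 2*u+1 := by omega
    have c4 : 2^e*(2*m+2) = 2*(2^e*(m+1)) := by ring
    omega
  obtain ⟨e, he⟩ := Nat.exists_eq_add_of_lt hrs
  have h2 : 2^s = 2^r * 2 * 2^e := by rw [he]; ring
  rw [h2] at hd ⊢
  by_contra h
  push_neg at h
  have c1 : 2*m+1 ≤ 2*(2^e*(2*u)) := by nlinarith
  have c2 : 2*(2^e*(2*u)) < 2*m+2 := by nlinarith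
  omega

-- ===== counting =====
def pvCnt (av : List Nat) (l r : Nat) : Nat := av.countP (fun v => decide (l ≤ v ∧ v < r))

theorem pvCnt_nil (l r : Nat) : pvCnt [] l r = 0 := rfl

theorem pvCnt_cons (a : Nat) (av : List Nat) (l r : Nat) :
    pvCnt (a :: av) l r = pvCnt av l r + (if l ≤ a ∧ a < r then 1 else 0) := by
  by_cases h : l ≤ a ∧ a < r <;> simp [pvCnt, List.countP_cons, h]

theorem pvCnt_append (av bv : List Nat) (l r : Nat) :
    pvCnt (av ++ bv) l r = pvCnt av l r + pvCnt bv l r := by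
  simp [pvCnt, List.countP_append]

theorem pvCnt_same (av : List Nat) (l : Nat) : pvCnt av l l = 0 := by
  simp only [pvCnt, List.countP_eq_zero]
  intro v _
  simp only [decide_eq_true_eq]
  omega

theorem pvCnt_split (av : List Nat) {l m r : Nat} (h1 : l ≤ m) (h2 : m ≤ r) :
    pvCnt av l m + pvCnt av m r = pvCnt av l r := by
  induction av with
  | nil => rfl
  | cons a av ih =>
    rw [pvCnt_cons, pvCnt_cons, pvCnt_cons]
    split_ifs <;> omega

theorem pvCnt_all (av : List Nat) (N : Nat) (h : ∀ v ∈ av, v < N) :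
    pvCnt av 0 N = av.length := by
  induction av with
  | nil => rfl
  | cons a av ih =>
    rw [pvCnt_cons, ih (fun v hv => h v (by simp [hv]))]
    have := h a (by simp)
    simp only [List.length_cons]
    split_ifs <;> omega

theorem pvCnt_succ (av : List Nat) (e : Nat) :
    pvCnt av 0 (e + 1) = pvCnt av 0 e + av.count e := by
  induction av with
  | nil => rfl
  | cons a av ih =>
    rw [pvCnt_cons, pvCnt_cons, ih, List.count_cons]
    simp only [beq_iff_eq]
    split_ifs <;> omega

theorem pvCnt_eraseIdx (av : List Nat) (t l r : Nat) (h : t < av.length) :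
    pvCnt av l r =
      pvCnt (av.eraseIdx t) l r + (if l ≤ av.getD t 0 ∧ av.getD t 0 < r then 1 else 0) := by
  rw [List.eraseIdx_eq_take_drop_succ]
  conv_lhs => rw [← List.take_append_drop t av, List.drop_eq_getElem_cons h]
  rw [pvCnt_append, pvCnt_cons, pvCnt_append]
  have hg : av.getD t 0 = av[t] := List.getD_eq_getElem av 0 h
  rw [hg]
  omega

theorem pv_mem_of_cnt {av : List Nat} {e t : Nat} (hs : av.Pairwise (· < ·))
    (h1 : pvCnt av 0 e ≤ t) (h2 : t < pvCnt av 0 (e + 1)) :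
    e ∈ av ∧ pvCnt av 0 e = t := by
  have hc := pvCnt_succ av e
  have hnd : av.Nodup := hs.imp Nat.ne_of_lt
  have hle : av.count e ≤ 1 := List.nodup_iff_count_le_one.mp hnd e
  have hpos : 0 < av.count e := by omega
  exact ⟨List.count_pos_iff.mp hpos, by omega⟩

theorem pv_sorted_getD : ∀ (av : List Nat) (e t : Nat), av.Pairwise (· < ·) →
    e ∈ av → pvCnt av 0 e = t → av.getD t 0 = e := by
  intro av
  induction av with
  | nil => intro e t _ he; simp at he
  | cons a av ih =>
    intro e t hs he hc
    rw [List.pairwise_cons] at hs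
    rw [pvCnt_cons] at hc
    rcases List.mem_cons.mp he with rfl | hmem
    · have hz : pvCnt av 0 e = 0 := by
        simp only [pvCnt, List.countP_eq_zero]
        intro v hv
        have := hs.1 v hv
        simp only [decide_eq_true_eq]
        omega
      have : t = 0 := by rw [hz, if_neg (show ¬(0 ≤ e ∧ e < e) by omega)] at hc; omega
      subst this; rfl
    · have hlt : a < e := hs.1 e hmem
      have ht : t = pvCnt av 0 e + 1 := by
        rw [if_pos (show 0 ≤ a ∧ a < e by omega)] at hc
        omega
      subst ht
      simpa using ih e (pvCnt av 0 e) hs.2 hmem rfl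

-- ===== chainAdj =====
theorem pvA_chainAdj_length (g : Nat → Nat) (N : Nat) :
    ∀ (fuel p : Nat) (tree : List Nat), (pvA_chainAdj g N tree p fuel).length = tree.length := by
  intro fuel
  induction fuel with
  | zero => intro p tree; rfl
  | succ fuel ih =>
    intro p tree
    unfold pvA_chainAdj
    split
    · rw [ih]; simp
    · rfl

theorem pvA_chainAdj_getD (g : Nat → Nat) (N : Nat) :
    ∀ (fuel p : Nat) (tree : List Nat), 1 ≤ p → N + 1 ≤ p + fuel → tree.length = N + 1 →
      ∀ q, 1 ≤ q → q ≤ N →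
        (pvA_chainAdj g N tree p fuel).getD q 0 =
          if p ≤ q ∧ q &&& (q - 1) < p then g (tree.getD q 0) else tree.getD q 0 := by
  intro fuel
  induction fuel with
  | zero =>
    intro p tree hp hfuel hlen q hq1 hq2
    rw [if_neg (by omega)]
    rfl
  | succ fuel ih =>
    intro p tree hp hfuel hlen q hq1 hq2
    unfold pvA_chainAdj
    by_cases hpN : p ≤ N
    · rw [if_pos hpN]
      have hand : p &&& (p - 1) ≤ p - 1 := Nat.and_le_right
      have hqand : q &&& (q - 1) ≤ q - 1 := Nat.and_le_right
      rw [ih (p + (p - (p &&& (p - 1)))) _ (by omega) (by omega) (by simpa using hlen) q hq1 hq2]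
      by_cases hqp : q = p
      · subst hqp
        rw [if_neg (by omega), if_pos (by omega)]
        simp [List.getD, List.getElem?_set, show q < tree.length by omega]
      · have hset : (tree.set p (g (tree.getD p 0))).getD q 0 = tree.getD q 0 := by
          simp [List.getD, List.getElem?_set, Ne.symm hqp]
        rw [hset]
        by_cases hc : p ≤ q ∧ q &&& (q - 1) < p
        · have hpq : p < q := by omega
          have := pv_B1 hp hq1 hpq hc.2
          rw [if_pos (by constructor <;> omega), if_pos hc]
        · rw [if_neg ?_, if_neg hc]
          intro hcc
          exact hc ⟨by omega, pv_B2 hp hq1 hcc.1 hcc.2⟩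
    · rw [if_neg hpN, if_neg (by omega)]

-- ===== query sum =====
theorem pvA_qsum_eq (N : Nat) (tree av : List Nat)
    (hval : ∀ q, 1 ≤ q → q ≤ N → tree.getD q 0 = pvCnt av (q &&& (q - 1)) q) :
    ∀ d, d ≤ N → pvA_qsum tree d = pvCnt av 0 d := by
  intro d
  induction d using Nat.strong_induction_on with
  | _ d ih =>
    intro hd
    by_cases h0 : d = 0
    · subst h0
      rw [pvA_qsum, if_pos rfl, pvCnt_same]
    · have hand : d &&& (d - 1) ≤ d - 1 := Nat.and_le_right
      rw [pvA_qsum, if_neg h0, hval d (by omega) hd, ih (d &&& (d - 1)) (by omega) (by omega)]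
      rw [Nat.add_comm, pvCnt_split av (Nat.zero_le _) (by omega)]

-- ===== binary search =====
theorem pvA_bsearch_spec (N : Nat) (tree av : List Nat)
    (hval : ∀ q, 1 ≤ q → q ≤ N → tree.getD q 0 = pvCnt av (q &&& (q - 1)) q) :
    ∀ (fuel l r t : Nat), l < r → r ≤ N → r - l ≤ fuel →
      pvCnt av 0 l ≤ t → t < pvCnt av 0 r →
      l ≤ pvA_bsearch tree t l r ((l + r) / 2) fuel ∧
      pvA_bsearch tree t l r ((l + r) / 2) fuel < r ∧
      pvCnt av 0 (pvA_bsearch tree t l r ((l + r) / 2) fuel) ≤ t ∧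
      t < pvCnt av 0 (pvA_bsearch tree t l r ((l + r) / 2) fuel + 1) := by
  intro fuel
  induction fuel with
  | zero => intro l r t h1 _ h3 _ _; omega
  | succ fuel ih =>
    intro l r t hlr hrN hfuel hcl hcr
    unfold pvA_bsearch
    by_cases h1 : 1 < r - l
    · rw [if_pos h1]
      have hdl : l < (l + r) / 2 := by omega
      have hdr : (l + r) / 2 < r := by omega
      rw [pvA_qsum_eq N tree av hval ((l + r) / 2) (by omega)]
      by_cases h2 : pvCnt av 0 ((l + r) / 2) ≤ t
      · rw [if_pos h2]
        have := ih ((l + r) / 2) r t hdr hrN (by omega) h2 hcr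
        exact ⟨by omega, this.2⟩
      · rw [if_neg h2]
        have := ih l ((l + r) / 2) t hdl (by omega) (by omega) hcl (by omega)
        exact ⟨this.1, by omega, this.2.2⟩
    · rw [if_neg h1]
      have hd : (l + r) / 2 = l := by omega
      rw [hd]
      have hr : r = l + 1 := by omega
      subst hr
      exact ⟨le_refl _, by omega, hcl, hcr⟩

-- ===== build invariant =====
theorem pv_build_partial (N : Nat) : ∀ m, m ≤ N →
    ((List.range m).foldl (fun tree i => pvA_chainAdj (· + 1) N tree (i + 1) (N + 1))
      (List.replicate (N + 1) 0)).length = N + 1 ∧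
    ∀ q, 1 ≤ q → q ≤ N →
      ((List.range m).foldl (fun tree i => pvA_chainAdj (· + 1) N tree (i + 1) (N + 1))
        (List.replicate (N + 1) 0)).getD q 0 = pvCnt (List.range m) (q &&& (q - 1)) q := by
  intro m
  induction m with
  | zero =>
    intro _
    refine ⟨by simp, fun q hq1 hq2 => ?_⟩
    rw [show List.range 0 = ([] : List Nat) from rfl, pvCnt_nil]
    simp
  | succ m ih =>
    intro hm
    obtain ⟨ihlen, ihval⟩ := ih (by omega)
    rw [List.range_succ, List.foldl_append]
    simp only [List.foldl_cons, List.foldl_nil]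
    constructor
    · rw [pvA_chainAdj_length]; exact ihlen
    · intro q hq1 hq2
      rw [pvA_chainAdj_getD (· + 1) N (N + 1) (m + 1) _ (by omega) (by omega) ihlen q hq1 hq2]
      rw [pvCnt_append, ihval q hq1 hq2, pvCnt_cons, pvCnt_nil]
      have hqand : q &&& (q - 1) ≤ q - 1 := Nat.and_le_right
      by_cases hc : m + 1 ≤ q ∧ q &&& (q - 1) < m + 1
      · rw [if_pos hc, if_pos (by omega)]
      · rw [if_neg hc, if_neg (by omega)]
        omega

-- ===== selection loop =====
theorem pv_sel (N : Nat) : ∀ (cs : List Nat) (i : Nat) (x : List Nat) (tree av res : List Nat),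
    tree.length = N + 1 →
    (∀ q, 1 ≤ q → q ≤ N → tree.getD q 0 = pvCnt av (q &&& (q - 1)) q) →
    av.Pairwise (· < ·) → (∀ v ∈ av, v < N) →
    av.length = cs.length →
    (∀ j, j < cs.length → cs.getD j 0 < cs.length - j) →
    i + cs.length = N →
    x.drop i = cs →
    res.length = i →
    ((List.range' i cs.length).foldl
      (fun (st : List Nat × List Nat) i =>
        let t := x.getD i 0
        let d := pvA_bsearch st.1 t 0 N (N / 2) N
        (pvA_chainAdj (· - 1) N st.1 (d + 1) (N + 1), st.2.set i d))
      (tree, res ++ List.replicate cs.length 0)).2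
    = res ++ pvB_pop cs av := by
  intro cs
  induction cs with
  | nil =>
    intro i x tree av res _ _ _ _ _ _ _ _ _
    simp [pvB_pop]
  | cons t0 cs ih =>
    intro i x tree av res hlen hval hsort hmem hlav hbound hiN hdrop hres
    have hN1 : 1 ≤ N := by simp only [List.length_cons] at hiN; omega
    have hlav' : av.length = cs.length + 1 := by simpa using hlav
    have ht0 : t0 < av.length := by
      have hb0 := hbound 0 (by simp)
      rw [List.getD_cons_zero] at hb0
      simp only [List.length_cons, Nat.sub_zero] at hb0
      omega
    -- the value read by A at index i is t0
    have hx : x.getD i 0 = t0 := by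
      have h1 : x[i]? = (x.drop i)[0]? := by
        rw [List.getElem?_drop]
        simp
      rw [hdrop] at h1
      rw [List.getD_eq_getElem?_getD, h1]
      rfl
    -- binary search returns e with pvCnt av 0 e ≤ t0 < pvCnt av 0 (e+1)
    have hcl : pvCnt av 0 0 ≤ t0 := by rw [pvCnt_same]; omega
    have hcr : t0 < pvCnt av 0 N := by rw [pvCnt_all av N hmem]; omega
    have hbs := pvA_bsearch_spec N tree av hval N 0 N t0 (by omega) (le_refl N)
      (by omega) hcl hcr
    rw [show (0 + N) / 2 = N / 2 by omega] at hbs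
    set e := pvA_bsearch tree t0 0 N (N / 2) N with he
    obtain ⟨_, heN, hce, hce1⟩ := hbs
    obtain ⟨hemem, hecnt⟩ := pv_mem_of_cnt hsort hce hce1
    have hsel : av.getD t0 0 = e := pv_sorted_getD av e t0 hsort hemem hecnt
    -- one unfolding of the fold
    simp only [List.length_cons] at *
    rw [List.range'_succ, List.foldl_cons]
    simp only [hx]
    rw [← he]
    -- rewrite the res update
    have hresup : (res ++ List.replicate (cs.length + 1) 0).set i e
        = (res ++ [e]) ++ List.replicate cs.length 0 := by
      rw [List.set_append, if_neg (by omega)]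
      rw [hres, Nat.sub_self]
      simp [List.replicate_succ]
    -- invariant for the new tree wrt av.eraseIdx t0
    have hlen' : (pvA_chainAdj (· - 1) N tree (e + 1) (N + 1)).length = N + 1 := by
      rw [pvA_chainAdj_length]; exact hlen
    have hval' : ∀ q, 1 ≤ q → q ≤ N →
        (pvA_chainAdj (· - 1) N tree (e + 1) (N + 1)).getD q 0
          = pvCnt (av.eraseIdx t0) (q &&& (q - 1)) q := by
      intro q hq1 hq2
      rw [pvA_chainAdj_getD (· - 1) N (N + 1) (e + 1) tree (by omega) (by omega) hlen q hq1 hq2]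
      have herase := pvCnt_eraseIdx av t0 (q &&& (q - 1)) q ht0
      rw [hsel] at herase
      have hqand : q &&& (q - 1) ≤ q - 1 := Nat.and_le_right
      by_cases hc : e + 1 ≤ q ∧ q &&& (q - 1) < e + 1
      · rw [if_pos hc, hval q hq1 hq2]
        rw [if_pos (by omega)] at herase
        omega
      · rw [if_neg hc, hval q hq1 hq2]
        rw [if_neg (by omega)] at herase
        omega
    -- B side unfolds
    have hpop : pvB_pop (t0 :: cs) av = e :: pvB_pop cs (av.eraseIdx t0) := by
      rw [pvB_pop, hsel]
    rw [hresup]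
    have hsub : (av.eraseIdx t0).Sublist av := List.eraseIdx_sublist av t0
    have ihres := ih (i + 1) x (pvA_chainAdj (· - 1) N tree (e + 1) (N + 1))
      (av.eraseIdx t0) (res ++ [e]) hlen' hval'
      (List.Pairwise.sublist hsub hsort)
      (fun v hv => hmem v (hsub.mem hv))
      (by rw [List.length_eraseIdx_of_lt ht0]; omega)
      (by
        intro j hj
        have := hbound (j + 1) (by simpa using Nat.succ_lt_succ hj)
        simpa using this)
      (by omega)
      (by rw [← List.tail_drop, hdrop]; rfl)
      (by simp [hres])
    rw [ihres, hpop]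
    simp

-- ===== getD helpers =====
theorem pv_getD_append_left (a b : List Nat) (j : Nat) (h : j < a.length) :
    (a ++ b).getD j 0 = a.getD j 0 := List.getD_append a b 0 j h

theorem pv_getD_append_right (a b : List Nat) (j : Nat) (h : a.length ≤ j) :
    (a ++ b).getD j 0 = b.getD (j - a.length) 0 := by
  simp [List.getD, List.getElem?_append_right h]

theorem pv_getD_take (l : List Nat) (m j : Nat) (h : j < m) :
    (l.take m).getD j 0 = l.getD j 0 := by
  simp [List.getD, List.getElem?_take, h]

theorem pv_getD_set_self (l : List Nat) (i v : Nat) (h : i < l.length) :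
    (l.set i v).getD i 0 = v := by
  simp [List.getD, List.getElem?_set, h]

theorem pv_getD_set_ne (l : List Nat) (i j v : Nat) (h : i ≠ j) :
    (l.set i v).getD j 0 = l.getD j 0 := by
  simp [List.getD, List.getElem?_set, h]

theorem pv_getD_map_range' (s len t : Nat) (f : Nat → Nat) (h : t < len) :
    ((List.range' s len).map f).getD t 0 = f (s + t) := by
  simp [List.getD, List.getElem?_map, List.getElem?_range', h]

theorem pv_getD_range_rev (n t : Nat) (h : t < n) :
    (List.range n).reverse.getD t 0 = n - 1 - t := by
  simp [List.getD, List.getElem?_reverse, List.getElem?_range, h]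

-- ===== stage 1: the first loop =====
def pvL (N K m : Nat) : List Nat × Nat :=
  (List.range m).foldl (fun st i => (st.1 ++ [st.2 / K], st.2 % K * (N - i - 1))) ([], N)

def pvLA (N K m : Nat) : List Nat × Nat :=
  (List.range m).foldl (fun st i => (st.1.set i (st.2 / K), st.2 % K * (N - i - 1)))
    (List.replicate N 0, N)

theorem pvL_succ (N K m : Nat) :
    pvL N K (m + 1) = ((pvL N K m).1 ++ [(pvL N K m).2 / K], (pvL N K m).2 % K * (N - m - 1)) := by
  unfold pvL
  rw [List.range_succ, List.foldl_append]
  rfl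

theorem pvLA_succ (N K m : Nat) :
    pvLA N K (m + 1) = ((pvLA N K m).1.set m ((pvLA N K m).2 / K), (pvLA N K m).2 % K * (N - m - 1)) := by
  unfold pvLA
  rw [List.range_succ, List.foldl_append]
  rfl

theorem pv_loop1_inv (N K : Nat) (hK : 1 ≤ K) (hKN : K ≤ N) : ∀ m, m ≤ N - K + 1 →
    pvLA N K m = ((pvL N K m).1 ++ List.replicate (N - m) 0, (pvL N K m).2) ∧
    (pvL N K m).1.length = m ∧
    (pvL N K m).2 ≤ K * (N - m) ∧
    (1 ≤ m → (pvL N K m).1.getD 0 0 = N / K) ∧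
    ((∀ j, j < m → (pvL N K m).1.getD j 0 + j + 1 ≤ N) ∨
     (∃ j0, j0 < m ∧ (pvL N K m).1.getD j0 0 = N - j0 ∧
        (∀ j, j < j0 → (pvL N K m).1.getD j 0 + j + 1 ≤ N) ∧
        (∀ l, j0 < l → l < m → (pvL N K m).1.getD l 0 = 0) ∧
        (pvL N K m).2 = 0)) := by
  intro m
  induction m with
  | zero =>
    intro _
    refine ⟨?_, rfl, ?_, by omega, Or.inl (by omega)⟩
    · simp [pvL, pvLA]
    · show N ≤ K * (N - 0)
      rw [Nat.sub_zero]
      calc N = 1 * N := (Nat.one_mul N).symm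
        _ ≤ K * N := Nat.mul_le_mul_right N hK
  | succ m ih =>
    intro hm1
    have hm : m ≤ N - K := by omega
    have hmN : m + 1 ≤ N := by omega
    obtain ⟨ihA, ihlen, iht, ihg0, ihQ⟩ := ih (by omega)
    have hKpos : 0 < K := hK
    -- abbreviations
    have hrep : N - m = (N - (m + 1)) + 1 := by omega
    constructor
    · -- A-side list equality
      rw [pvLA_succ, pvL_succ, ihA]
      refine Prod.ext ?_ rfl
      show ((pvL N K m).1 ++ List.replicate (N - m) 0).set m ((pvL N K m).2 / K)
          = ((pvL N K m).1 ++ [(pvL N K m).2 / K]) ++ List.replicate (N - (m + 1)) 0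
      rw [List.set_append, if_neg (by omega), ihlen, Nat.sub_self]
      rw [hrep, List.replicate_succ, List.set_cons_zero]
      simp
    refine ⟨?_, ?_, ?_, ?_⟩
    · rw [pvL_succ]; simp [ihlen]
    · -- t bound
      rw [pvL_succ]
      show (pvL N K m).2 % K * (N - m - 1) ≤ K * (N - (m + 1))
      have hmod : (pvL N K m).2 % K ≤ K - 1 := by
        have := Nat.mod_lt (pvL N K m).2 hKpos
        omega
      calc (pvL N K m).2 % K * (N - m - 1) ≤ K * (N - m - 1) :=
            Nat.mul_le_mul_right _ (by omega)
        _ = K * (N - (m + 1)) := by rw [show N - m - 1 = N - (m + 1) by omega]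
    · -- getD 0
      intro _
      rw [pvL_succ]
      by_cases hm0 : m = 0
      · subst hm0
        show (([] : List Nat) ++ [N / K]).getD 0 0 = N / K
        simp
      · rw [pv_getD_append_left _ _ 0 (by omega)]
        exact ihg0 (by omega)
    · -- the Q invariant
      rw [pvL_succ]
      rcases ihQ with hQ | ⟨j0, hj0m, hj0v, hj0b, hj0z, ht0⟩
      · by_cases ht : (pvL N K m).2 = K * (N - m)
        · -- exact hit: new case 2 with j0 = m
          right
          refine ⟨m, by omega, ?_, ?_, by omega, ?_⟩
          · rw [pv_getD_append_right _ _ m (by omega), ihlen, Nat.sub_self]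
            rw [ht, Nat.mul_div_cancel_left _ hKpos]
            rfl
          · intro j hj
            rw [pv_getD_append_left _ _ j (by omega)]
            exact hQ j (by omega)
          · show (pvL N K m).2 % K * (N - m - 1) = 0
            rw [ht, Nat.mul_mod_right, Nat.zero_mul]
        · -- still case 1
          left
          intro j hj
          by_cases hjm : j = m
          · rw [hjm, pv_getD_append_right _ _ m (by omega), ihlen, Nat.sub_self]
            show (pvL N K m).2 / K + m + 1 ≤ N
            have hdd : (pvL N K m).2 / K < N - m :=
              (Nat.div_lt_iff_lt_mul hKpos).mpr (by rw [Nat.mul_comm (N - m) K]; omega)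
            omega
          · rw [pv_getD_append_left _ _ j (by omega)]
            exact hQ j (by omega)
      · -- case 2 persists
        right
        refine ⟨j0, by omega, ?_, ?_, ?_, ?_⟩
        · rw [pv_getD_append_left _ _ j0 (by omega)]
          exact hj0v
        · intro j hj
          rw [pv_getD_append_left _ _ j (by omega)]
          exact hj0b j hj
        · intro l hl1 hl2
          by_cases hlm : l = m
          · rw [hlm, pv_getD_append_right _ _ m (by omega), ihlen, Nat.sub_self]
            show (pvL N K m).2 / K = 0
            rw [ht0, Nat.zero_div]
          · rw [pv_getD_append_left _ _ l (by omega)]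
            exact hj0z l hl1 (by omega)
        · show (pvL N K m).2 % K * (N - m - 1) = 0
          rw [ht0, Nat.zero_mod, Nat.zero_mul]

-- ===== findNZ =====
theorem pv_findNZ_spec (xs : List Nat) (h0 : xs.getD 0 0 ≠ 0) : ∀ p,
    pvB_findNZ xs p ≤ p ∧ xs.getD (pvB_findNZ xs p) 0 ≠ 0 ∧
    ∀ l, pvB_findNZ xs p < l → l ≤ p → xs.getD l 0 = 0 := by
  intro p
  induction p with
  | zero => exact ⟨le_refl _, h0, by omega⟩
  | succ p ih =>
    by_cases hz : xs.getD (p + 1) 0 = 0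
    · rw [show pvB_findNZ xs (p + 1) = pvB_findNZ xs p by rw [pvB_findNZ, if_pos hz]]
      refine ⟨by omega, ih.2.1, ?_⟩
      intro l hl1 hl2
      by_cases hlp : l = p + 1
      · rw [hlp]; exact hz
      · exact ih.2.2 l hl1 (by omega)
    · rw [show pvB_findNZ xs (p + 1) = p + 1 by rw [pvB_findNZ, if_neg hz]]
      exact ⟨le_refl _, hz, by omega⟩

theorem pv_findNZ_set_high (xs : List Nat) (i v : Nat) : ∀ p, p < i →
    pvB_findNZ (xs.set i v) p = pvB_findNZ xs p := by
  intro p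
  induction p with
  | zero => intro _; rfl
  | succ p ih =>
    intro h
    rw [pvB_findNZ, pvB_findNZ, pv_getD_set_ne xs i (p + 1) v (by omega)]
    by_cases hz : xs.getD (p + 1) 0 = 0
    · rw [if_pos hz, if_pos hz, ih (by omega)]
    · rw [if_neg hz, if_neg hz]

-- drop of a list set at the drop position
theorem pv_drop_set_self (l : List Nat) (p v : Nat) (h : p < l.length) :
    (l.set p v).drop p = v :: l.drop (p + 1) := by
  rw [List.drop_eq_getElem_cons (show p < (l.set p v).length by simpa using h)]
  rw [List.getElem_set_self]
  congr 1
  exact List.drop_set_of_lt (by omega)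

-- ===== the borrow loop =====
theorem pv_borrow_eq (N : Nat) (r' : List Nat) : ∀ (p : Nat) (xs : List Nat), p < xs.length →
    xs.getD 0 0 ≠ 0 →
    pvA_borrow N (xs ++ r') p =
      ((xs.set (pvB_findNZ xs p) (xs.getD (pvB_findNZ xs p) 0 - 1)).take (pvB_findNZ xs p + 1)
        ++ (List.range' (pvB_findNZ xs p + 1) (p - pvB_findNZ xs p)).map (fun j => N - j - 1)
        ++ xs.drop (p + 1)) ++ r' := by
  intro p
  induction p with
  | zero =>
    intro xs hlen h0
    rw [pvA_borrow, if_pos (by rwa [pv_getD_append_left _ _ 0 hlen])]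
    show (xs ++ r').set 0 ((xs ++ r').getD 0 0 - 1) = _
    rw [pv_getD_append_left _ _ 0 hlen, List.set_append, if_pos hlen]
    show xs.set 0 (xs.getD 0 0 - 1) ++ r' = _
    rw [show pvB_findNZ xs 0 = 0 from rfl]
    rw [show (0 : Nat) - 0 = 0 from rfl]
    rw [show List.range' (0 + 1) 0 = [] from rfl, List.map_nil]
    rw [show List.drop (0 + 1) xs = List.drop (0 + 1) (xs.set 0 (xs.getD 0 0 - 1)) from
      (List.drop_set_of_lt (by omega)).symm]
    simp only [List.append_nil, List.nil_append]
    rw [List.take_append_drop]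
  | succ p ih =>
    intro xs hlen h0
    by_cases hz : xs.getD (p + 1) 0 = 0
    · -- x[p+1] = 0 : A writes N-p-2 there and recurses; findNZ skips
      have hq : pvB_findNZ xs (p + 1) = pvB_findNZ xs p := by rw [pvB_findNZ, if_pos hz]
      have hcond : ¬ (xs ++ r').getD (p + 1) 0 ≠ 0 := by
        rw [pv_getD_append_left _ _ (p + 1) hlen]
        simpa using hz
      rw [pvA_borrow, if_neg hcond]
      show pvA_borrow N ((xs ++ r').set (p + 1) (N - (p + 1) - 1)) p = _
      rw [List.set_append, if_pos hlen]
      set xs' := xs.set (p + 1) (N - (p + 1) - 1) with hxs'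
      have hlen' : p < xs'.length := by simp [hxs']; omega
      have h0' : xs'.getD 0 0 ≠ 0 := by
        rw [hxs', pv_getD_set_ne xs _ _ _ (by omega)]; exact h0
      rw [ih xs' hlen' h0']
      have hqc : pvB_findNZ xs' p = pvB_findNZ xs p := pv_findNZ_set_high xs (p + 1) _ p (by omega)
      set q := pvB_findNZ xs p with hqdef
      have hqp : q ≤ p := (pv_findNZ_spec xs h0 p).1
      rw [hqc, hq]
      -- take part
      have htake : (xs'.set q (xs'.getD q 0 - 1)).take (q + 1)
          = (xs.set q (xs.getD q 0 - 1)).take (q + 1) := by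
        rw [hxs', pv_getD_set_ne xs _ _ _ (by omega)]
        rw [List.set_comm _ _ (by omega : p + 1 ≠ q)]
        exact List.take_set_of_le (by omega)
      -- drop part
      have hdrop : xs'.drop (p + 1) = (N - (p + 1) - 1) :: xs.drop (p + 2) :=
        pv_drop_set_self xs (p + 1) _ hlen
      -- range extension
      have hrange : List.range' (q + 1) (p + 1 - q) = List.range' (q + 1) (p - q) ++ [p + 1] := by
        rw [show p + 1 - q = (p - q) + 1 by omega, List.range'_1_concat]
        rw [show q + 1 + (p - q) = p + 1 by omega]
      rw [htake, hdrop, hrange, List.map_append]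
      simp
    · -- x[p+1] ≠ 0 : stop here
      have hq : pvB_findNZ xs (p + 1) = p + 1 := by rw [pvB_findNZ, if_neg hz]
      rw [pvA_borrow, if_pos (by rw [pv_getD_append_left _ _ (p + 1) hlen]; simpa using hz)]
      show (xs ++ r').set (p + 1) ((xs ++ r').getD (p + 1) 0 - 1) = _
      rw [pv_getD_append_left _ _ (p + 1) hlen, List.set_append, if_pos hlen, hq]
      rw [show p + 1 - (p + 1) = 0 by omega]
      rw [show List.range' (p + 1 + 1) 0 = [] from rfl, List.map_nil]
      rw [show List.drop (p + 1 + 1) xs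
            = List.drop (p + 1 + 1) (xs.set (p + 1) (xs.getD (p + 1) 0 - 1)) from
        (List.drop_set_of_lt (by omega)).symm]
      simp only [List.append_nil, List.nil_append]
      rw [List.take_append_drop]

-- ===== the fill loop =====
theorem pv_fill_partial (N K : Nat) (hK : 1 ≤ K) (hKN : K ≤ N) (y : List Nat)
    (hy : y.length = N - K + 1) : ∀ m, m ≤ K - 1 →
    (List.range m).foldl (fun z i => z.set (N - i - 1) i) (y ++ List.replicate (K - 1) 0)
      = y ++ (List.replicate (K - 1 - m) 0 ++ (List.range m).reverse) := by
  intro m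
  induction m with
  | zero => simp
  | succ m ih =>
    intro hm
    rw [List.range_succ, List.foldl_append, ih (by omega)]
    simp only [List.foldl_cons, List.foldl_nil]
    have hidx : N - m - 1 = y.length + (K - 2 - m) := by omega
    rw [hidx, List.set_append, if_neg (by omega)]
    rw [Nat.add_sub_cancel_left]
    rw [List.set_append, if_pos (by simp; omega)]
    rw [show K - 1 - m = (K - 2 - m) + 1 by omega, List.replicate_succ']
    rw [List.set_append, if_neg (by simp)]
    simp only [List.length_replicate, Nat.sub_self, List.set_cons_zero]
    rw [show K - 1 - (m + 1) = K - 2 - m by omega]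
    simp [List.range_succ]

-- ===== codes: equality, length, bounds =====
theorem pv_codes_facts (N K : Nat) (hK : 1 ≤ K) (hKN : K ≤ N) :
    pvA_codes N K = pvB_codes N K ∧ (pvB_codes N K).length = N ∧
    (∀ j, j < N → (pvB_codes N K).getD j 0 + j + 1 ≤ N) := by
  obtain ⟨hA, hlen, ht, hg0, hQ⟩ := pv_loop1_inv N K hK hKN (N - K + 1) (le_refl _)
  have hBc : pvB_codes N K
      = ((pvL N K (N - K + 1)).1.set (pvB_findNZ (pvL N K (N - K + 1)).1 (N - K))
           ((pvL N K (N - K + 1)).1.getD (pvB_findNZ (pvL N K (N - K + 1)).1 (N - K)) 0 - 1)).take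
           (pvB_findNZ (pvL N K (N - K + 1)).1 (N - K) + 1)
        ++ (List.range' (pvB_findNZ (pvL N K (N - K + 1)).1 (N - K) + 1)
              (N - K - pvB_findNZ (pvL N K (N - K + 1)).1 (N - K))).map (fun j => N - j - 1)
        ++ (List.range (K - 1)).reverse := rfl
  set xs := (pvL N K (N - K + 1)).1 with hxs
  have hx0 : xs.getD 0 0 ≠ 0 := by
    rw [hg0 (by omega)]
    have : 1 ≤ N / K := (Nat.one_le_div_iff hK).mpr hKN
    omega
  set q := pvB_findNZ xs (N - K) with hq
  obtain ⟨hqle, hqnz, hqz⟩ := pv_findNZ_spec xs hx0 (N - K)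
  rw [← hq] at hqle hqnz hqz
  have hC1 : ∀ j, j < q → xs.getD j 0 + j + 1 ≤ N := by
    rcases hQ with hQ | ⟨j0, hj0m, hj0v, hj0b, hj0z, _⟩
    · intro j hj; exact hQ j (by omega)
    · have hqj0 : q = j0 := by
        by_cases h : q < j0
        · exfalso
          have hz := hqz j0 h (by omega)
          rw [hz] at hj0v
          omega
        · by_cases h2 : j0 < q
          · exfalso; exact hqnz (hj0z q h2 (by omega))
          · omega
      intro j hj; exact hj0b j (by omega)
  have hC2 : xs.getD q 0 ≤ N - q := by
    rcases hQ with hQ | ⟨j0, hj0m, hj0v, hj0b, hj0z, _⟩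
    · have := hQ q (by omega); omega
    · have hqj0 : q = j0 := by
        by_cases h : q < j0
        · exfalso
          have hz := hqz j0 h (by omega)
          rw [hz] at hj0v
          omega
        · by_cases h2 : j0 < q
          · exfalso; exact hqnz (hj0z q h2 (by omega))
          · omega
      rw [hqj0, hj0v]
  have hA1 : (pvA_loop1 N K).1 = xs ++ List.replicate (K - 1) 0 := by
    show (pvLA N K (N - K + 1)).1 = _
    rw [hA]
    rw [show N - (N - K + 1) = K - 1 by omega]
  have hxslen : xs.length = N - K + 1 := hlen
  have hborrow := pv_borrow_eq N (List.replicate (K - 1) 0) (N - K) xs (by omega) hx0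
  rw [show N - K + 1 = xs.length by omega, List.drop_length, List.append_nil] at hborrow
  have hYlen : ((xs.set q (xs.getD q 0 - 1)).take (q + 1)
      ++ (List.range' (q + 1) (N - K - q)).map (fun j => N - j - 1)).length = N - K + 1 := by
    simp only [List.length_append, List.length_take, List.length_map, List.length_range',
      List.length_set]
    omega
  have hfill := pv_fill_partial N K hK hKN _ hYlen (K - 1) (le_refl _)
  rw [Nat.sub_self] at hfill
  refine ⟨?_, ?_, ?_⟩
  · show pvA_fill N K (pvA_borrow N (pvA_loop1 N K).1 (N - K)) = pvB_codes N K
    rw [hA1, hborrow]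
    show (List.range (K - 1)).foldl _ _ = _
    rw [hfill, hBc]
    simp
  · rw [hBc]
    simp only [List.length_append, List.length_take, List.length_map, List.length_range',
      List.length_set, List.length_reverse, List.length_range]
    omega
  · intro j hj
    rw [hBc]
    by_cases h1 : j ≤ q
    · rw [pv_getD_append_left _ _ j (by
        simp only [List.length_append, List.length_take, List.length_map, List.length_range',
          List.length_set]
        omega)]
      rw [pv_getD_append_left _ _ j (by simp only [List.length_take, List.length_set]; omega)]
      rw [pv_getD_take _ _ _ (by omega)]
      by_cases h2 : j = q
      · rw [h2, pv_getD_set_self xs q (xs.getD q 0 - 1) (by omega)]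
        have : 1 ≤ xs.getD q 0 := by omega
        omega
      · rw [pv_getD_set_ne xs q j (xs.getD q 0 - 1) (by omega : q ≠ j)]
        have := hC1 j (by omega)
        omega
    · by_cases h2 : j ≤ N - K
      · rw [pv_getD_append_left _ _ j (by
          simp only [List.length_append, List.length_take, List.length_map, List.length_range',
            List.length_set]
          omega)]
        rw [pv_getD_append_right _ _ j (by simp only [List.length_take, List.length_set]; omega)]
        rw [show ((xs.set q (xs.getD q 0 - 1)).take (q + 1)).length = q + 1 by
          simp only [List.length_take, List.length_set]; omega]
        rw [pv_getD_map_range' _ _ _ _ (by omega)]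
        omega
      · rw [pv_getD_append_right _ _ j (by
          simp only [List.length_append, List.length_take, List.length_map, List.length_range',
            List.length_set]
          omega)]
        rw [show ((xs.set q (xs.getD q 0 - 1)).take (q + 1)
            ++ (List.range' (q + 1) (N - K - q)).map fun j => N - j - 1).length = N - K + 1 by
          simp only [List.length_append, List.length_take, List.length_map, List.length_range',
            List.length_set]
          omega]
        rw [pv_getD_range_rev _ _ (by omega)]
        omega

-- ===== glue: build invariant and whole-program equality =====
theorem pv_build_inv (N : Nat) :
    (pvA_build N).length = N + 1 ∧
    ∀ q, 1 ≤ q → q ≤ N → (pvA_build N).getD q 0 = pvCnt (List.range N) (q &&& (q - 1)) q :=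
  pv_build_partial N N (le_refl N)

theorem pv_main_eq (N : Nat) (x : List Nat) (hlx : x.length = N)
    (hbound : ∀ j, j < x.length → x.getD j 0 < x.length - j) :
    pvA_main N x = pvB_pop x (List.range N) := by
  unfold pvA_main
  rw [List.range_eq_range']
  have hs := pv_sel N x 0 x (pvA_build N) (List.range N) []
    (pv_build_inv N).1 (pv_build_inv N).2
    List.pairwise_lt_range
    (fun v hv => List.mem_range.mp hv)
    (by simp [hlx])
    hbound
    (by omega)
    List.drop_zero
    rfl
  rw [hlx] at hs
  rw [List.range_eq_range'] at hs
  simpa using hs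

theorem pv_equiv (n k : Int) (h1 : 1 ≤ k) (h2 : k ≤ n) : ARC047C n k = ARC047C_alt n k := by
  have hK : 1 ≤ k.toNat := by omega
  have hKN : k.toNat ≤ n.toNat := by omega
  obtain ⟨hceq, hclen, hcb⟩ := pv_codes_facts n.toNat k.toNat hK hKN
  unfold ARC047C ARC047C_alt
  rw [hceq, pv_main_eq n.toNat (pvB_codes n.toNat k.toNat) hclen
    (fun j hj => by
      rw [hclen] at hj ⊢
      have := hcb j hj
      omega)]

-- ===== VERDICT (by name: the statement is the Claim_ definition above) =====
theorem ARC047C_spec : Claim_equal_ARC047C := by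
  intro n k _ hpre
  show ARC047C n k = ARC047C_alt n k
  exact pv_equiv n k hpre.1 hpre.2
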